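-- pv_equiv track=rewrite | github.com/kevinroyhobson/2000.news | backend/Tournament/tournament.py | distribute_into_groups
-- ===== SOURCE A (Python) =====
-- def distribute_into_groups(items: list, num_groups: int) -> list:
--     """Distribute items as evenly as possible into num_groups groups."""
--     base_size = len(items) // num_groups
--     remainder = len(items) % num_groups
--
--     groups = []
--     start = 0
--     for i in range(num_groups):
--         size = base_size + (1 if i < remainder else 0)
--         groups.append(items[start:start + size])
--         start += size
--
--     return groups
-- ===== SOURCE B (Python) =====
-- def distribute_into_groups(items: list, num_groups: int) -> list:
--     """Distribute items as evenly as possible into num_groups groups.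
--
--     Greedy peeling: while groups remain, take the next ceil(remaining/k)
--     items off an iterator as the next group and re-divide on what is left.
--     No precomputed base size/remainder and no running offset.
--     """
--     groups = []
--     it = iter(items)
--     remaining = len(items)
--     k = num_groups
--     while k > 0:
--         head = -(-remaining // k)
--         groups.append([next(it) for _ in range(head)])
--         remaining -= head
--         k -= 1
--     return groups
-- ===== Notes on version B (the rewrite author's own statement) =====
-- stated objective: alternative
-- what changed: Replaces A's precomputed base-size/remainder and running start offset by greedy peeling: each step takes ceil(remaining/k) items off an iterator as the next group and re-divides on what is left, consuming the input instead of indexing into it.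
import Mathlib
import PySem

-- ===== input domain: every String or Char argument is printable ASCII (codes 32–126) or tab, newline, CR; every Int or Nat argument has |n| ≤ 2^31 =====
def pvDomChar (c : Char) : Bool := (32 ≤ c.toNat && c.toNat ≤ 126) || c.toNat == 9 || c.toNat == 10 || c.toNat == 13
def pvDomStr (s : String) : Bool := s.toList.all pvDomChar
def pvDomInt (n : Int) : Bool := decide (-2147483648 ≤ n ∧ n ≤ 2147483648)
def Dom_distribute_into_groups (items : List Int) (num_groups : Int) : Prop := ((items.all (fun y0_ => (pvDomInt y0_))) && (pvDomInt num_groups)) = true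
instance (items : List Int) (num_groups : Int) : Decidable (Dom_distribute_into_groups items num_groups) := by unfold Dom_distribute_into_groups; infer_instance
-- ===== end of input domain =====

-- B replaces A's precomputed base-size/remainder plus running start offset by greedy
-- peeling: each step cuts ceil(len(rest)/k) items off the remaining list and re-divides
-- on what is left; objective: alternative decomposition (no speed claim).

-- ===== PORT A =====
-- A: computes base size and remainder once, then loops i over range(num_groups)
-- threading (groups, start) as state; each step appends items[start:start+size].
def distribute_into_groups (items : List Int) (num_groups : Int) : List (List Int) :=
  let base_size := PySem.Int.floordiv (items.length : Int) num_groups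
  let remainder := PySem.Int.mod (items.length : Int) num_groups
  ((PySem.List.pyRange 0 num_groups 1).foldl
    (fun (st : List (List Int) × Int) i =>
      (st.1 ++ [PySem.List.slice items (some st.2)
          (some (st.2 + (base_size + (if i < remainder then (1 : Int) else 0))))],
       st.2 + (base_size + (if i < remainder then (1 : Int) else 0))))
    ([], 0)).1

-- ===== PORT B =====
-- B: while k > 0, take ceil(remaining/k) items off an iterator as the next group.
-- The while loop (k counting down to 0, state = the unconsumed part of the iterator
-- plus the remaining count) is transcribed as structural recursion on the iteration
-- count k.toNat; '[next(it) for _ in range(head)]' is List.take, advancing the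
-- iterator is List.drop.
def pvPeelNat : List Int → Int → Nat → List (List Int)
  | _, _, 0 => []
  | rest, remaining, k + 1 =>
    let head := -(PySem.Int.floordiv (-remaining) ((k : Int) + 1))
    rest.take head.toNat :: pvPeelNat (rest.drop head.toNat) (remaining - head) k

def distribute_into_groups_alt (items : List Int) (num_groups : Int) : List (List Int) :=
  pvPeelNat items items.length num_groups.toNat

-- ===== PRECONDITION & SPEC =====
-- Pre_ excludes num_groups = 0, where Python A raises ZeroDivisionError.
def Pre_distribute_into_groups (items : List Int) (num_groups : Int) : Prop := num_groups ≠ 0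
instance (items : List Int) (num_groups : Int) : Decidable (Pre_distribute_into_groups items num_groups) := by unfold Pre_distribute_into_groups; infer_instance

def pvWitness_distribute_into_groups : List Int × Int := ([1, 2, 3, 4, 5], 3)

def Spec_distribute_into_groups (items : List Int) (num_groups : Int) (out : List (List Int)) : Prop := out = distribute_into_groups_alt items num_groups
instance (items : List Int) (num_groups : Int) (out : List (List Int)) : Decidable (Spec_distribute_into_groups items num_groups out) := by unfold Spec_distribute_into_groups; infer_instance

-- ===== CLAIM (what is proved, stated in full; the proofs are below) =====
def Claim_equal_distribute_into_groups : Prop := ∀ (items : List Int) (num_groups : Int), Dom_distribute_into_groups items num_groups → Pre_distribute_into_groups items num_groups → Spec_distribute_into_groups items num_groups (distribute_into_groups items num_groups)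

-- ===== LEMMAS AND PROOFS =====

-- The common closed-form boundary both ports are reduced to.
def pvBound (base rem i : Int) : Int := i * base + min i rem

-- Loop invariant for A: after the first k iterations A's state is (the slices at
-- boundaries pvBound 0..k, pvBound k).
lemma pv_loop_eq (items : List Int) (base rem : Int) (hrem : 0 ≤ rem) (k : Nat) :
    (PySem.List.pyRange 0 (k : Int) 1).foldl
      (fun (st : List (List Int) × Int) i =>
        (st.1 ++ [PySem.List.slice items (some st.2)
            (some (st.2 + (base + (if i < rem then (1 : Int) else 0))))],
         st.2 + (base + (if i < rem then (1 : Int) else 0))))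
      ([], 0)
    = ((PySem.List.pyRange 0 (k : Int) 1).map
        (fun i => PySem.List.slice items (some (pvBound base rem i)) (some (pvBound base rem (i + 1)))),
       pvBound base rem (k : Int)) := by
  induction k with
  | zero =>
    rw [show ((0 : Nat) : Int) = 0 from rfl, PySem.List.pyRange_one_eq_nil (le_refl 0)]
    simp [pvBound]
    omega
  | succ k ih =>
    have hsplit : PySem.List.pyRange 0 ((k : Int) + 1) 1
        = PySem.List.pyRange 0 (k : Int) 1 ++ [(k : Int)] :=
      PySem.List.pyRange_one_succ_right (Int.natCast_nonneg k)
    have hb : pvBound base rem (k : Int)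
        + (base + (if (k : Int) < rem then (1 : Int) else 0))
        = pvBound base rem ((k : Int) + 1) := by
      unfold pvBound
      split_ifs with h
      · rw [min_eq_left (by omega), min_eq_left (by omega)]; ring
      · rw [min_eq_right (by omega), min_eq_right (by omega)]; ring
    push_cast
    rw [hsplit, List.foldl_append, List.map_append, ih]
    simp only [List.foldl_cons, List.foldl_nil, List.map_cons, List.map_nil, hb]

-- Slicing a dropped list is slicing the original at shifted boundaries.
lemma pv_slice_drop (xs : List Int) (m : Nat) (a b : Int) (ha : 0 ≤ a) (hb : 0 ≤ b) :
    PySem.List.slice (xs.drop m) (some a) (some b)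
      = PySem.List.slice xs (some (a + m)) (some (b + m)) := by
  rw [PySem.List.slice_toNat _ ha hb,
      PySem.List.slice_toNat _ (by omega) (by omega),
      List.drop_drop]
  have h1 : m + a.toNat = (a + (m : Int)).toNat := by omega
  have h2 : b.toNat - a.toNat = (b + (m : Int)).toNat - (a + (m : Int)).toNat := by omega
  rw [h1, h2]

-- Shifting a boundary of the peeled tail by the head size gives the next boundary
-- of the original list.
lemma pv_bound_shift (base rem j : Int) (hj : 0 ≤ j) (hrem : 0 ≤ rem) :
    pvBound base (rem - (if 0 < rem then 1 else 0)) j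
      + (base + (if 0 < rem then 1 else 0))
      = pvBound base rem (j + 1) := by
  unfold pvBound
  have h : (j + 1) * base = j * base + base := by ring
  rw [h]
  split_ifs with hp <;> generalize j * base = t <;> omega

-- B's peeling computes the closed-form slices, for any decomposition
-- len(items) = base*k + rem with 0 ≤ base, 0 ≤ rem < k.
lemma pv_peel_eq (k : Nat) (items : List Int) (m base rem : Int)
    (hm : m = (items.length : Int))
    (hb : 0 ≤ base) (hr0 : 0 ≤ rem) (hrk : rem < (k : Int))
    (hlen : (items.length : Int) = base * k + rem) :
    pvPeelNat items m k
      = (List.range k).map (fun (j : Nat) =>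
          PySem.List.slice items (some (pvBound base rem (j : Int)))
            (some (pvBound base rem ((j : Int) + 1)))) := by
  induction k generalizing items m base rem with
  | zero => exact absurd hrk (by omega)
  | succ k ih =>
    subst hm
    rw [pvPeelNat]
    have hk1 : (0 : Int) < (k : Int) + 1 := by omega
    set n : Int := (items.length : Int) with hn
    have hh1 : -(PySem.Int.floordiv (-n) ((k : Int) + 1))
        = base + (if 0 < rem then 1 else 0) := by
      rw [PySem.Int.neg_floordiv_neg_eq_iff_of_pos hk1]
      push_cast at hlen hrk
      split_ifs with hp <;> constructor <;> nlinarith [hlen, hrk, hr0, hk1]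
    have hh1nn : 0 ≤ base + (if 0 < rem then 1 else 0) := by split_ifs <;> omega
    have hh1le : base + (if 0 < rem then 1 else 0) ≤ n := by
      push_cast at hlen hrk
      have hbk : 0 ≤ base * (k : Int) := mul_nonneg hb (Int.natCast_nonneg k)
      split_ifs with hp <;> nlinarith [hlen, hrk, hr0, hbk]
    rw [hh1]
    set h1 : Int := base + (if 0 < rem then 1 else 0) with hh1def
    have hnn : 0 ≤ n := by positivity
    have hlen' : (((items.drop h1.toNat).length : Nat) : Int)
        = base * k + (rem - (if 0 < rem then 1 else 0)) := by
      rw [List.length_drop]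
      push_cast at hlen ⊢
      have : (h1.toNat : Int) = h1 := by omega
      have hexp : base * ((k : Int) + 1) = base * k + base := by ring
      rw [hexp] at hlen
      omega
    set rem' : Int := rem - (if 0 < rem then 1 else 0) with hrem'def
    have hr0' : 0 ≤ rem' := by rw [hrem'def]; split_ifs <;> omega
    rcases Nat.eq_zero_or_pos k with hk0 | hkpos
    · -- last group: k = 0, the tail peel is empty and the range has one element
      subst hk0
      have hrem0 : rem = 0 := by omega
      rw [pvPeelNat]
      simp only [List.range_succ, List.range_zero, List.nil_append, List.map_cons, List.map_nil,
        Nat.cast_zero]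
      have hb0' : pvBound base rem 0 = 0 := by unfold pvBound; simp; omega
      have hb1' : pvBound base rem (0 + 1) = h1 := by
        unfold pvBound; rw [hh1def]; split_ifs <;> omega
      rw [hb0', hb1']
      simp [PySem.List.slice_to _ hh1nn]
    · have hrk' : rem' < (k : Int) := by rw [hrem'def]; push_cast at hrk ⊢; split_ifs <;> omega
      have hm' : n - h1 = (((items.drop h1.toNat).length : Nat) : Int) := by
        rw [List.length_drop]; omega
      rw [ih (items.drop h1.toNat) (n - h1) base rem' hm' hb hr0' hrk' hlen']
      rw [List.range_succ_eq_map, List.map_cons, List.map_map]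
      congr 1
      · -- head group
        have h0 : pvBound base rem ((0 : Nat) : Int) = 0 := by unfold pvBound; simp; omega
        have hb1 : pvBound base rem (((0 : Nat) : Int) + 1) = h1 := by
          unfold pvBound; rw [hh1def]; split_ifs <;> simp <;> omega
        rw [h0, hb1]
        simp [PySem.List.slice_to _ hh1nn]
      · -- tail groups: shift each boundary by h1
        refine List.map_congr_left (fun j hj => ?_)
        have hjb : 0 ≤ pvBound base rem' (j : Int) := by
          unfold pvBound
          have := mul_nonneg (Int.natCast_nonneg j) hb
          have : 0 ≤ min (j : Int) rem' := le_min (Int.natCast_nonneg j) hr0'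
          positivity
        have hjb1 : 0 ≤ pvBound base rem' ((j : Int) + 1) := by
          unfold pvBound
          have h1' := mul_nonneg (by omega : (0:Int) ≤ (j : Int) + 1) hb
          have h2' : 0 ≤ min ((j : Int) + 1) rem' := le_min (by omega) hr0'
          omega
        rw [pv_slice_drop _ _ _ _ hjb hjb1]
        have hcast : ((h1.toNat : Nat) : Int) = h1 := by omega
        rw [hcast]
        rw [show pvBound base rem' (j : Int) + h1
              = pvBound base rem ((j : Int) + 1) from pv_bound_shift base rem _ (by positivity) hr0]
        rw [show pvBound base rem' ((j : Int) + 1) + h1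
              = pvBound base rem ((j : Int) + 1 + 1) from pv_bound_shift base rem _ (by positivity) hr0]
        simp only [Function.comp_apply, Nat.succ_eq_add_one]
        push_cast
        ring_nf

-- ===== VERDICT (by name: the statement is the Claim_ definition above) =====
theorem distribute_into_groups_spec : Claim_equal_distribute_into_groups := by
  intro items num_groups _ hpre
  rcases lt_trichotomy num_groups 0 with hneg | hzero | hpos
  · have h0 : num_groups.toNat = 0 := by omega
    simp [Spec_distribute_into_groups, distribute_into_groups, distribute_into_groups_alt,
      PySem.List.pyRange_one_eq_nil (le_of_lt hneg), h0, pvPeelNat]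
  · exact absurd hzero hpre
  · set base := PySem.Int.floordiv (items.length : Int) num_groups with hbase
    set rem := PySem.Int.mod (items.length : Int) num_groups with hrem
    have hr0 : 0 ≤ rem := PySem.Int.mod_nonneg _ hpos
    have hrlt : rem < num_groups := PySem.Int.mod_lt _ hpos
    have hb0 : 0 ≤ base := by
      rw [hbase, PySem.Int.floordiv_eq_ediv_of_pos hpos]
      exact Int.ediv_nonneg (Int.natCast_nonneg _) (le_of_lt hpos)
    have hlen : (items.length : Int) = base * num_groups + rem := by
      have := PySem.Int.floordiv_mul_add_mod (items.length : Int) num_groups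
      rw [← hbase, ← hrem] at this
      linarith
    have hk : num_groups = ((num_groups.toNat : Nat) : Int) := by omega
    simp only [Spec_distribute_into_groups, distribute_into_groups, distribute_into_groups_alt,
      ← hbase, ← hrem]
    rw [hk, pv_loop_eq items base rem hr0 num_groups.toNat, Int.toNat_natCast]
    rw [pv_peel_eq num_groups.toNat items (items.length : Int) base rem rfl hb0 hr0 (by omega) (by rw [hk] at hlen; exact hlen)]
    rw [PySem.List.pyRange_one, List.map_map]
    simp only [Int.sub_zero]
    rw [show ((num_groups.toNat : Int)).toNat = num_groups.toNat from by omega]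
    exact List.map_congr_left (fun j hj => by simp)
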